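-- pv_equiv track=rewrite | github.com/MrBrantCode/unitest_baseline | mut_generate/mist_train_cf/cf_61610/solution.py | find_common_characters
-- ===== SOURCE A (Python) =====
-- def find_common_characters(str1, str2):
--     str1 = str1.lower()
--     str2 = str2.lower()
--     dict1 = {}
--     dict2 = {}
--     common_dict = {}
--
--     # Iterating over each character in str1 and str2 to find the frequency count
--     for char in str1:
--         if char not in dict1:
--             dict1[char] = 1
--         else:
--             dict1[char] += 1
--
--     for char in str2:
--         if char not in dict2:
--             dict2[char] = 1
--         else:
--             dict2[char] += 1
--
--     # Checking common keys in dict1 and dict2 and adding their values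
--     for key in dict1:
--         if key in dict2:
--             common_dict[key] = dict1[key] + dict2[key]
--
--     return common_dict
-- ===== SOURCE B (Python) =====
-- def find_common_characters(str1, str2):
--     s1 = str1.lower()
--     s2 = str2.lower()
--     # Count the concatenation once, then keep the characters occurring in both strings.
--     combined = {}
--     for ch in s1 + s2:
--         combined[ch] = combined.get(ch, 0) + 1
--     return {c: n for c, n in combined.items() if c in s1 and c in s2}
-- ===== Notes on version B (the rewrite author's own statement) =====
-- stated objective: alternative
-- what changed: Instead of building two per-string frequency dictionaries and merging their common keys with summed values, B counts the single concatenated string s1+s2 in one table and then filters that table's items to characters that occur (as substrings) in both strings, so no per-string counts are ever formed or added.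
import Mathlib
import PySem

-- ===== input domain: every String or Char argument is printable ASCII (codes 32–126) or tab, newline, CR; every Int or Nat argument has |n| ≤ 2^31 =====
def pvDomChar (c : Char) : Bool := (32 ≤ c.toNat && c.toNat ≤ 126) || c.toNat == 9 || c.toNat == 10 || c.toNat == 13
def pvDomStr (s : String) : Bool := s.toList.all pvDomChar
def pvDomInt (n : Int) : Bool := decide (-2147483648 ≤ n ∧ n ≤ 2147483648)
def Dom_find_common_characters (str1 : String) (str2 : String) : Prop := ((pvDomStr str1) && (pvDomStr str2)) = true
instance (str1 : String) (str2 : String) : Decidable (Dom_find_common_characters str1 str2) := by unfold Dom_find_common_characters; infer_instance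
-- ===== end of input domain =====

-- B counts the single concatenation s1+s2 in one table and filters its items to characters
-- occurring in both strings, instead of A's two per-string frequency dicts merged by key.

-- ===== PORT A =====
def find_common_characters (str1 : String) (str2 : String) : List (String × Int) :=
  let s1 := (PySem.Str.lower str1).toList.map (fun c => String.ofList [c])
  let s2 := (PySem.Str.lower str2).toList.map (fun c => String.ofList [c])
  let dict1 := s1.foldl (fun d ch =>
    if d.contains ch = false then d.insert ch 1 else d.insert ch (d.getD ch 0 + 1))
    PySem.Dict.empty
  let dict2 := s2.foldl (fun d ch =>
    if d.contains ch = false then d.insert ch 1 else d.insert ch (d.getD ch 0 + 1))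
    PySem.Dict.empty
  let common := dict1.keys.foldl (fun cd k =>
    if dict2.contains k then cd.insert k (dict1.getD k 0 + dict2.getD k 0) else cd)
    PySem.Dict.empty
  common.items

-- ===== PORT B =====
-- 'c in s1' in Source B is Python substring containment; every key c is a single character of
-- s1+s2, so on these length-1 strings it is exactly membership in the character list s1.
def find_common_characters_alt (str1 : String) (str2 : String) : List (String × Int) :=
  let s1 := (PySem.Str.lower str1).toList.map (fun c => String.ofList [c])
  let s2 := (PySem.Str.lower str2).toList.map (fun c => String.ofList [c])
  let combined := (s1 ++ s2).foldl (fun d ch => d.insert ch (d.getD ch 0 + 1)) PySem.Dict.empty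
  combined.items.filter (fun p => s1.contains p.1 && s2.contains p.1)

-- ===== PRECONDITION & SPEC =====
def Spec_find_common_characters (str1 : String) (str2 : String) (out : List (String × Int)) : Prop := out = find_common_characters_alt str1 str2
instance (str1 : String) (str2 : String) (out : List (String × Int)) : Decidable (Spec_find_common_characters str1 str2 out) := by unfold Spec_find_common_characters; infer_instance

-- ===== CLAIM (what is proved, stated in full; the proofs are below) =====
def Claim_equal_find_common_characters : Prop := ∀ (str1 : String) (str2 : String), Dom_find_common_characters str1 str2 → Spec_find_common_characters str1 str2 (find_common_characters str1 str2)

-- ===== LEMMAS AND PROOFS =====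

-- A's counting loops (branching on membership) are exactly the Counter fold.
lemma count_fold_eq_counter (l : List String) :
    l.foldl (fun d ch =>
      if d.contains ch = false then d.insert ch 1 else d.insert ch (d.getD ch 0 + 1))
      PySem.Dict.empty = PySem.Dict.counter l := by
  have hfun : (fun (d : PySem.Dict String Int) ch =>
      if d.contains ch = false then d.insert ch 1 else d.insert ch (d.getD ch 0 + 1))
      = fun d ch => d.insert ch (d.getD ch 0 + 1) := by
    funext d ch
    by_cases h : d.contains ch
    · simp [h]
    · simp only [Bool.not_eq_true] at h
      simp [h, PySem.Dict.getD_of_not_contains d 0 h]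
  rw [hfun, PySem.Dict.foldl_insert_getD_add_one_eq_counter]

-- A's merge loop, when fed distinct fresh keys, appends one item per kept key.
lemma merge_fold_items (p : String → Bool) (f : String → Int) :
    ∀ (l : List String) (d : PySem.Dict String Int), l.Nodup →
      (∀ k ∈ l, d.contains k = false) →
      (l.foldl (fun cd k => if p k then cd.insert k (f k) else cd) d).items
        = d.items ++ (l.filter p).map (fun k => (k, f k)) := by
  intro l
  induction l with
  | nil => intro d _ _; simp
  | cons k l ih =>
    intro d hnd hfresh
    have hk : d.contains k = false := hfresh k (by simp)
    have hfresh' : ∀ k' ∈ l, k' ≠ k ∧ d.contains k' = false := by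
      intro k' hk'
      exact ⟨fun he => (List.nodup_cons.mp hnd).1 (he ▸ hk'), hfresh k' (by simp [hk'])⟩
    simp only [List.foldl_cons]
    by_cases hp : p k
    · have hrest : ∀ k' ∈ l, (d.insert k (f k)).contains k' = false := by
        intro k' hk'
        rw [PySem.Dict.contains_insert]
        simp [beq_eq_false_iff_ne.mpr (hfresh' k' hk').1, (hfresh' k' hk').2]
      rw [hp]
      simp only [if_true]
      rw [ih (d.insert k (f k)) (List.nodup_cons.mp hnd).2 hrest,
          PySem.Dict.items_insert_of_not_contains _ _ hk]
      simp [hp]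
    · simp only [hp, if_false, Bool.false_eq_true]
      rw [ih d (List.nodup_cons.mp hnd).2 (fun k' hk' => (hfresh' k' hk').2)]
      simp [hp]

-- A's result: the merged dict's items as a filter-map over the deduplicated chars of l1.
lemma a_items_eq (l1 l2 : List String) :
    ((PySem.Dict.counter l1).keys.foldl (fun cd k =>
        if (PySem.Dict.counter l2).contains k then
          cd.insert k ((PySem.Dict.counter l1).getD k 0 + (PySem.Dict.counter l2).getD k 0)
        else cd) PySem.Dict.empty).items
      = ((PySem.Set.ofList l1).filter (fun c => l2.contains c)).map
          (fun c => (c, ((l1.count c : Int) + (l2.count c : Int)))) := by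
  rw [merge_fold_items _ _ _ PySem.Dict.empty
        (by rw [PySem.Dict.keys_counter]; exact PySem.Set.nodup_ofList l1)
        (by intro k _; exact PySem.Dict.contains_empty k)]
  rw [show (PySem.Dict.empty : PySem.Dict String Int).items = [] from rfl, List.nil_append,
      PySem.Dict.keys_counter]
  congr 1
  · funext k
    simp [PySem.Dict.getD_counter]
  · apply List.filter_congr
    intro k _
    rw [PySem.Dict.contains_counter]

-- B's filter on the dedup of the concatenation equals A's filter on the dedup of l1.
lemma dedup_append_filter (l1 l2 : List String) :
    (PySem.Set.ofList (l1 ++ l2)).filter (fun c => l1.contains c && l2.contains c)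
      = (PySem.Set.ofList l1).filter (fun c => l2.contains c) := by
  rw [PySem.Set.ofList_append, PySem.Set.update_eq_append_filter, List.filter_append]
  have h2 : (((PySem.Set.ofList l2).filter
      (fun y => !(PySem.Set.contains (PySem.Set.ofList l1) y))).filter
      (fun c => l1.contains c && l2.contains c)) = [] := by
    rw [List.filter_eq_nil_iff]
    intro c hc
    obtain ⟨_, hnc⟩ := List.mem_filter.mp hc
    have hn1 : c ∉ l1 := by
      intro h
      have := (PySem.Set.contains_iff (PySem.Set.ofList l1) c).mpr
        ((PySem.Set.mem_ofList l1 c).mpr h)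
      rw [this] at hnc
      simp at hnc
    simp [hn1]
  rw [h2, List.append_nil]
  apply List.filter_congr
  intro c hc
  have : c ∈ l1 := (PySem.Set.mem_ofList l1 c).mp hc
  simp [this]

-- Filtering a key-tagged map by a predicate on the key commutes with the map.
lemma filter_fst_map (l s1 s2 : List String) (g : String → Int) :
    (l.map (fun k => (k, g k))).filter (fun q => s1.contains q.1 && s2.contains q.1)
      = (l.filter (fun k => s1.contains k && s2.contains k)).map (fun k => (k, g k)) := by
  induction l with
  | nil => rfl
  | cons k l ih =>
    simp only [List.map_cons, List.filter_cons]
    by_cases hp : k ∈ s1 ∧ k ∈ s2 <;> simp [hp] <;> simpa using ih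

-- ===== VERDICT (by name: the statement is the Claim_ definition above) =====
theorem find_common_characters_spec : Claim_equal_find_common_characters := by
  intro str1 str2 _
  unfold Spec_find_common_characters
  simp only [find_common_characters, find_common_characters_alt, count_fold_eq_counter,
             PySem.Dict.foldl_insert_getD_add_one_eq_counter, PySem.Dict.items_counter,
             a_items_eq]
  rw [filter_fst_map, dedup_append_filter]
  apply List.map_congr_left
  intro c _
  simp [List.count_append]
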